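-- pv_equiv track=rewrite | github.com/Rahib-Khan/NASN_OCR | TableReconstruct.py | get_column_for_position
-- ===== SOURCE A (Python) =====
-- from typing import List, Dict, Tuple
--
-- def get_column_for_position(x_pos: int, column_lines: List[int]) -> int:
--     """
--     Figure out which column an x-position belongs to.
--     Returns -1 if it's outside the boundaries.
--     Column numbering starts at 1 (between first and second line).
--     """
--     if not column_lines:
--         return -1
--
--     # Left of first line
--     if x_pos < column_lines[0]:
--         return -1
--
--     # Right of last line
--     if x_pos > column_lines[-1]:
--         return -1
--
--     # Find which column (between lines)
--     for i in range(len(column_lines) - 1):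
--         if column_lines[i] <= x_pos < column_lines[i + 1]:
--             return i + 1  # Column 1, 2, 3, etc.
--
--     return -1
-- ===== SOURCE B (Python) =====
-- def get_column_for_position(x_pos: int, column_lines: list) -> int:
--     """
--     Binary search (bisect_right, hand-rolled) for the column interval
--     containing x_pos; requires column_lines sorted non-decreasingly.
--     """
--     if not column_lines or x_pos < column_lines[0] or x_pos >= column_lines[-1]:
--         return -1
--     lo, hi = 0, len(column_lines)
--     while lo < hi:
--         mid = (lo + hi) // 2
--         if x_pos < column_lines[mid]:
--             hi = mid
--         else:
--             lo = mid + 1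
--     return lo
-- ===== Notes on version B (the rewrite author's own statement) =====
-- stated objective: faster
-- what changed: Replaced the linear scan over adjacent line pairs with a binary search (bisect_right) for the insertion point, under the precondition that column_lines is sorted non-decreasingly (the intended use: column boundary lines are ordered).
-- outside the precondition, e.g. on get_column_for_position(5, [0, 10, 2, 20]): A returns 1, B returns 3
import Mathlib
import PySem

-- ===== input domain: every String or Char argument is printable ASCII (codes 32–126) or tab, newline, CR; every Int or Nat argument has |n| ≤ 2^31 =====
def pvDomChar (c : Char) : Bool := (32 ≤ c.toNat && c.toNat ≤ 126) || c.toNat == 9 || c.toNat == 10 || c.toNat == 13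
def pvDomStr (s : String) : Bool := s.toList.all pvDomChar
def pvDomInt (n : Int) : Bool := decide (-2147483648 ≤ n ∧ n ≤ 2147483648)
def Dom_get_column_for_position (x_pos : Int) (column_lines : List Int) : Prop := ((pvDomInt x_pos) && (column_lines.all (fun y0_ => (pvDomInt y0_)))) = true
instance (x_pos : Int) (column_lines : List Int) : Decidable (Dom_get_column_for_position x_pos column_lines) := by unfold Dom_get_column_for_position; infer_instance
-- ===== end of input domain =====

-- B replaces A's linear scan over adjacent line pairs by a binary search (bisect_right)
-- for the insertion point; exact on sorted (non-decreasing) column_lines (see Pre_).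

-- ===== PORT A =====
-- the 'for i in range(len(column_lines) - 1)' loop with early return; fuel ≥ remaining
-- iterations makes it total; indices are always in range, so cl[i]! is exact here
def pvALoop (x : Int) (cl : List Int) : Nat → Nat → Int
  | 0, _ => -1
  | fuel + 1, i =>
    if i + 1 < cl.length then
      if cl[i]! ≤ x ∧ x < cl[i+1]! then ((i : Int) + 1)
      else pvALoop x cl fuel (i + 1)
    else -1

def get_column_for_position (x_pos : Int) (column_lines : List Int) : Int :=
  if column_lines = [] then -1                         -- if not column_lines
  else if x_pos < column_lines[0]! then -1             -- x_pos < column_lines[0]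
  -- column_lines[-1] = last element (list nonempty here), exact
  else if x_pos > column_lines[column_lines.length - 1]! then -1
  else pvALoop x_pos column_lines column_lines.length 0

-- ===== PORT B =====
-- the hand-rolled bisect_right while-loop of Source B; fuel ≥ hi - lo makes it total
def pvBSearch (cl : List Int) (x : Int) : Nat → Nat → Nat → Nat
  | 0, lo, _ => lo
  | fuel + 1, lo, hi =>
    if lo < hi then
      let mid := (lo + hi) / 2
      if x < cl[mid]! then pvBSearch cl x fuel lo mid
      else pvBSearch cl x fuel (mid + 1) hi
    else lo

def get_column_for_position_alt (x_pos : Int) (column_lines : List Int) : Int :=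
  if column_lines = [] then -1
  else if x_pos < column_lines[0]! then -1
  else if column_lines[column_lines.length - 1]! ≤ x_pos then -1   -- x_pos >= column_lines[-1]
  else (pvBSearch column_lines x_pos column_lines.length 0 column_lines.length : Int)

-- ===== PRECONDITION & SPEC =====
-- Pre_ excludes only unsorted column_lines with x_pos inside [first, last] (on
-- which A still returns a value): binary search is only meaningful on sorted
-- boundaries, the function's intended input; outside [first, last] both return -1.
def Pre_get_column_for_position (x_pos : Int) (column_lines : List Int) : Prop :=
  List.Pairwise (· ≤ ·) column_lines ∨
  x_pos < column_lines[0]! ∨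
  column_lines[column_lines.length - 1]! < x_pos
instance (x_pos : Int) (column_lines : List Int) : Decidable (Pre_get_column_for_position x_pos column_lines) := by unfold Pre_get_column_for_position; infer_instance
def pvWitness_get_column_for_position : Int × List Int := (7, [0, 5, 10, 20])

def Spec_get_column_for_position (x_pos : Int) (column_lines : List Int) (out : Int) : Prop := out = get_column_for_position_alt x_pos column_lines
instance (x_pos : Int) (column_lines : List Int) (out : Int) : Decidable (Spec_get_column_for_position x_pos column_lines out) := by unfold Spec_get_column_for_position; infer_instance

-- ===== CLAIM (what is proved, stated in full; the proofs are below) =====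
def Claim_equal_get_column_for_position : Prop := ∀ (x_pos : Int) (column_lines : List Int), Dom_get_column_for_position x_pos column_lines → Pre_get_column_for_position x_pos column_lines → Spec_get_column_for_position x_pos column_lines (get_column_for_position x_pos column_lines)

-- ===== LEMMAS AND PROOFS =====

-- sorted lists: monotone access
theorem pv_sorted_le {cl : List Int} (hs : List.Pairwise (· ≤ ·) cl)
    {i j : Nat} (hij : i ≤ j) (hj : j < cl.length) : cl[i]! ≤ cl[j]! := by
  have hi : i < cl.length := lt_of_le_of_lt hij hj
  rw [getElem!_pos cl i hi, getElem!_pos cl j hj]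
  rcases Nat.eq_or_lt_of_le hij with h | h
  · subst h; simp
  · exact List.pairwise_iff_getElem.mp hs i j hi hj h

-- binary-search invariant (no sortedness needed)
theorem pvBSearch_inv (cl : List Int) (x : Int) :
    ∀ fuel lo hi, hi - lo ≤ fuel → lo ≤ hi → hi ≤ cl.length →
      lo ≤ pvBSearch cl x fuel lo hi ∧ pvBSearch cl x fuel lo hi ≤ hi ∧
      (lo < pvBSearch cl x fuel lo hi → cl[pvBSearch cl x fuel lo hi - 1]! ≤ x) ∧
      (pvBSearch cl x fuel lo hi < hi → x < cl[pvBSearch cl x fuel lo hi]!) := by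
  intro fuel
  induction fuel with
  | zero =>
    intro lo hi hf hlohi hhi
    have : lo = hi := by omega
    subst this
    exact ⟨le_refl _, le_refl _, by simp [pvBSearch], by simp [pvBSearch]⟩
  | succ fuel ih =>
    intro lo hi hf hlohi hhi
    show  lo ≤ pvBSearch cl x (fuel+1) lo hi ∧ _
    rw [pvBSearch]
    by_cases hlt : lo < hi
    · rw [if_pos hlt]
      show lo ≤ (if x < cl[(lo + hi) / 2]! then _ else _) ∧ _
      by_cases hc : x < cl[(lo + hi) / 2]!
      · rw [if_pos hc]
        obtain ⟨h1, h2, h3, h4⟩ := ih lo ((lo + hi) / 2) (by omega) (by omega) (by omega)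
        refine ⟨h1, by omega, h3, ?_⟩
        intro hr
        rcases Nat.lt_or_ge (pvBSearch cl x fuel lo ((lo + hi) / 2)) ((lo + hi) / 2) with h | h
        · exact h4 h
        · have : pvBSearch cl x fuel lo ((lo + hi) / 2) = (lo + hi) / 2 := by omega
          rw [this]; exact hc
      · rw [if_neg hc]
        obtain ⟨h1, h2, h3, h4⟩ := ih ((lo + hi) / 2 + 1) hi (by omega) (by omega) hhi
        refine ⟨by omega, h2, ?_, h4⟩
        intro hr
        rcases Nat.lt_or_ge ((lo + hi) / 2 + 1) (pvBSearch cl x fuel ((lo + hi) / 2 + 1) hi) with h | h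
        · exact h3 h
        · have : pvBSearch cl x fuel ((lo + hi) / 2 + 1) hi = (lo + hi) / 2 + 1 := by omega
          rw [this]
          simpa using Int.not_lt.mp hc
    · rw [if_neg hlt]
      exact ⟨le_refl _, by omega, by omega, by omega⟩

-- A's loop hits exactly index r-1 when cl[r-1] ≤ x < cl[r] (sorted)
theorem pvALoop_eq (x : Int) (cl : List Int) (hs : List.Pairwise (· ≤ ·) cl)
    (r : Nat) (hr1 : 1 ≤ r) (hrlen : r < cl.length)
    (hle : cl[r-1]! ≤ x) (hlt : x < cl[r]!) :
    ∀ fuel i, i ≤ r - 1 → cl.length ≤ fuel + i → pvALoop x cl fuel i = (r : Int) := by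
  intro fuel
  induction fuel with
  | zero => intro i hi hfl; omega
  | succ fuel ih =>
    intro i hi hfl
    rw [pvALoop]
    rw [if_pos (by omega : i + 1 < cl.length)]
    by_cases hir : i = r - 1
    · subst hir
      have hrr : r - 1 + 1 = r := by omega
      rw [hrr, if_pos ⟨hle, hlt⟩]
      omega
    · have hfail : ¬ (cl[i]! ≤ x ∧ x < cl[i+1]!) := by
        intro ⟨_, hx⟩
        have : cl[i+1]! ≤ cl[r-1]! := pv_sorted_le hs (by omega) (by omega)
        omega
      rw [if_neg hfail]
      exact ih (i + 1) (by omega) (by omega)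

-- A's loop finds nothing when x ≥ last element (sorted)
theorem pvALoop_none (x : Int) (cl : List Int) (hs : List.Pairwise (· ≤ ·) cl)
    (hge : cl[cl.length - 1]! ≤ x) :
    ∀ fuel i, pvALoop x cl fuel i = -1 := by
  intro fuel
  induction fuel with
  | zero => intro i; rfl
  | succ fuel ih =>
    intro i
    rw [pvALoop]
    by_cases h : i + 1 < cl.length
    · rw [if_pos h]
      have hfail : ¬ (cl[i]! ≤ x ∧ x < cl[i+1]!) := by
        intro ⟨_, hx⟩
        have : cl[i+1]! ≤ cl[cl.length - 1]! := pv_sorted_le hs (by omega) (by omega)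
        omega
      rw [if_neg hfail]
      exact ih (i + 1)
    · rw [if_neg h]

-- ===== VERDICT (by name: the statement is the Claim_ definition above) =====
theorem get_column_for_position_spec : Claim_equal_get_column_for_position := by
  intro x cl _hdom hpre
  unfold Spec_get_column_for_position
  unfold get_column_for_position get_column_for_position_alt
  by_cases he : cl = []
  · simp [he]
  · rw [if_neg he, if_neg he]
    have hlen : 1 ≤ cl.length := List.length_pos_iff.mpr he
    by_cases h0 : x < cl[0]!
    · rw [if_pos h0, if_pos h0]
    · rw [if_neg h0, if_neg h0]
      by_cases h1 : x > cl[cl.length - 1]!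
      · have h1' : cl[cl.length - 1]! ≤ x := le_of_lt h1
        rw [if_pos h1, if_pos h1']
      · rw [if_neg h1]
        have hs : List.Pairwise (· ≤ ·) cl := by
          unfold Pre_get_column_for_position at hpre
          rcases hpre with h | h | h
          · exact h
          · exact absurd h h0
          · exact absurd h (by omega)
        by_cases h2 : cl[cl.length - 1]! ≤ x
        · rw [if_pos h2]
          exact pvALoop_none x cl hs h2 _ 0
        · rw [if_neg h2]
          -- boundary case: cl[0] ≤ x < last
          obtain ⟨hr1, hr2, hr3, hr4⟩ :=
            pvBSearch_inv cl x cl.length 0 cl.length (by omega) (Nat.zero_le _) (le_refl _)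
          set r := pvBSearch cl x cl.length 0 cl.length with hrdef
          have hrpos : 1 ≤ r := by
            by_contra hcon
            have hr0 : r = 0 := by omega
            have hx : x < cl[r]! := hr4 (by omega)
            rw [hr0] at hx
            omega
          have hrlt : r < cl.length := by
            by_contra hcon
            have hrl : r = cl.length := by omega
            have hx : cl[r - 1]! ≤ x := hr3 (by omega)
            rw [hrl] at hx
            omega
          exact pvALoop_eq x cl hs r hrpos hrlt (hr3 (by omega)) (hr4 hrlt) _ 0 (by omega) (by omega)
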